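-- pv_equiv track=rewrite | github.com/TERADA-DANTE/algorithm | python/acmicpc/_2607.py | isSimmilar
-- ===== SOURCE A (Python) =====
-- def isSame(initial, candidate):
--     if set(initial) != set(candidate):
--         return False
--     for s in set(initial):
--         if initial.count(s) != candidate.count(s):
--             return False
--     return True
--
-- def isSimmilar(initial, candidate):
--     i = len(initial)
--     c = len(candidate)
--     # 같은 길이인경우
--     if i == c:
--         # 그대로 같은 문자인경우
--         if isSame(initial, candidate):
--             return 1
--     # 하나 바꿔야 같은 문자인 경우
--     # 카운트 같은건 일단 삭제?
--         temp = list(candidate)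
--         for v in initial:
--             if v in temp:
--                 temp.remove(v)
--         if len(temp) == 1:
--             return 1
--         return 0
--     # 같은 문자
--     # 두개의 단어가 같은 종류의 문자로 이루어져 있다.
--     # 같은 문자는 같은 개수 만큼 있다.
--     # 이니셜이 한개 더 큰경우
--     elif i == c+1:
--         temp = list(initial)
--         for v in candidate:
--             if v in temp:
--                 temp.remove(v)
--         if len(temp) == 1:
--             return 1
--         return 0
--         # 이니셜이 한개 더 작은 경우
--         # 이니셜에 한개 더 추가해서 같은 문자를 만들어야함
--         # DOG
--         # DLGO
--     elif i+1 == c: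
--         temp = list(candidate)
--         for v in initial:
--             if v in temp:
--                 temp.remove(v)
--         if len(temp) == 1:
--             return 1
--         return 0
--     else:
--         return 0
-- ===== SOURCE B (Python) =====
-- def isSimmilar(initial, candidate):
--     a = sorted(initial)
--     b = sorted(candidate)
--     i = j = 0
--     pa = pb = 0
--     while i < len(a) and j < len(b):
--         if a[i] == b[j]:
--             i += 1
--             j += 1
--         elif a[i] < b[j]:
--             pa += 1
--             i += 1
--         else:
--             pb += 1
--             j += 1
--     pa += len(a) - i
--     pb += len(b) - j
--     if len(initial) == len(candidate):
--         return 1 if pb <= 1 else 0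
--     if len(initial) == len(candidate) + 1:
--         return 1 if pa == 1 else 0
--     if len(initial) + 1 == len(candidate):
--         return 1 if pb == 1 else 0
--     return 0
-- ===== Notes on version B (the rewrite author's own statement) =====
-- stated objective: faster
-- what changed: Replaces A's repeated set/.count comparisons and the O(n^2) 'v in temp'/list.remove scans by sorting both words once and counting unmatched characters on each side in a single two-pointer merge pass.
import Mathlib
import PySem

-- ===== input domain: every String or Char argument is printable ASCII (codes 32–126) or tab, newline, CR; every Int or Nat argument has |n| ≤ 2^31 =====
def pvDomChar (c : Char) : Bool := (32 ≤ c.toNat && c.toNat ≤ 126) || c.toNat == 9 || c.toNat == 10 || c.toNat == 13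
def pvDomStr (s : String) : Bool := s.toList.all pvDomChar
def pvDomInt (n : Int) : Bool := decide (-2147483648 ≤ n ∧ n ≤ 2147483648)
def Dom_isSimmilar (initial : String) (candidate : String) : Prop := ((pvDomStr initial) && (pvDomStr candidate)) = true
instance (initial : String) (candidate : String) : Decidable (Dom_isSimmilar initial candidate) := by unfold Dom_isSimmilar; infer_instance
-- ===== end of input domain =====

-- B replaces A's quadratic set/count/remove scans by sorting both words and one
-- linear merge pass counting the unmatched characters on each side (alternative
-- algorithm; same results).

-- ===== PORT A =====

-- helper isSame: the early-returning for-loop over set(initial) is the Bool 'all'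
def isSameA (il cl : List Char) : Bool :=
  if ¬ (PySem.Set.equal (PySem.Set.ofList il) (PySem.Set.ofList cl) = true) then false
  else (PySem.Set.ofList il).all (fun s => PySem.List.count il s == PySem.List.count cl s)

-- the 'for v in initial: if v in temp: temp.remove(v)' loop
def removeLoop (vs temp : List Char) : List Char :=
  vs.foldl (fun t v =>
    if v ∈ t then
      match PySem.List.remove? t v with
      | some t' => t'
      | none => t
    else t) temp

def isSimmilar (initial : String) (candidate : String) : Int :=
  let i := PySem.Str.len initial
  let c := PySem.Str.len candidate
  if i = c then
    if isSameA initial.toList candidate.toList then 1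
    else
      let temp := removeLoop initial.toList candidate.toList
      if temp.length = 1 then 1 else 0
  else if i = c + 1 then
    let temp := removeLoop candidate.toList initial.toList
    if temp.length = 1 then 1 else 0
  else if i + 1 = c then
    let temp := removeLoop initial.toList candidate.toList
    if temp.length = 1 then 1 else 0
  else 0

-- ===== PORT B =====

-- the two-pointer while loop of Source B, consuming the sorted lists from the front
def mergeGo : List Char → List Char → Int → Int → Int × Int
  | [], b, pa, pb => (pa, pb + b.length)
  | x :: a, [], pa, pb => (pa + (x :: a).length, pb)
  | x :: a, y :: b, pa, pb =>
    if x = y then mergeGo a b pa pb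
    else if x < y then mergeGo a (y :: b) (pa + 1) pb
    else mergeGo (x :: a) b pa (pb + 1)
termination_by a b _ _ => a.length + b.length

def isSimmilar_alt (initial : String) (candidate : String) : Int :=
  let a := PySem.List.sorted initial.toList (fun x => x) false
  let b := PySem.List.sorted candidate.toList (fun x => x) false
  let p := mergeGo a b 0 0
  if PySem.Str.len initial = PySem.Str.len candidate then
    if p.2 ≤ 1 then 1 else 0
  else if PySem.Str.len initial = PySem.Str.len candidate + 1 then
    if p.1 = 1 then 1 else 0
  else if PySem.Str.len initial + 1 = PySem.Str.len candidate then
    if p.2 = 1 then 1 else 0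
  else 0

-- ===== PRECONDITION & SPEC =====
def Spec_isSimmilar (initial : String) (candidate : String) (out : Int) : Prop := out = isSimmilar_alt initial candidate
instance (initial : String) (candidate : String) (out : Int) : Decidable (Spec_isSimmilar initial candidate out) := by unfold Spec_isSimmilar; infer_instance

-- ===== CLAIM (what is proved, stated in full; the proofs are below) =====
def Claim_equal_isSimmilar : Prop := ∀ (initial : String) (candidate : String), Dom_isSimmilar initial candidate → Spec_isSimmilar initial candidate (isSimmilar initial candidate)

-- ===== LEMMAS AND PROOFS =====

-- the remove loop computes the multiset difference temp - vs
theorem removeLoop_multiset (vs : List Char) : ∀ temp : List Char,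
    ((removeLoop vs temp : List Char) : Multiset Char) = (temp : Multiset Char) - (vs : Multiset Char) := by
  induction vs with
  | nil => intro temp; simp [removeLoop]
  | cons v vs ih =>
    intro temp
    have hstep : removeLoop (v :: vs) temp =
        removeLoop vs (if v ∈ temp then temp.erase v else temp) := by
      simp only [removeLoop, List.foldl_cons]
      by_cases hv : v ∈ temp
      · simp [hv, PySem.List.remove?_eq_some_erase temp v hv]
      · simp [hv]
    rw [hstep, ih]
    have : ((v :: vs : List Char) : Multiset Char) = v ::ₘ (vs : Multiset Char) := rfl
    rw [this, Multiset.sub_cons]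
    by_cases hv : v ∈ temp
    · simp [hv, ← Multiset.coe_erase]
    · have he : ((temp : Multiset Char)).erase v = (temp : Multiset Char) :=
        Multiset.erase_of_notMem (by simpa using hv)
      rw [if_neg hv, he]

theorem removeLoop_length (vs temp : List Char) :
    (removeLoop vs temp).length = ((temp : Multiset Char) - (vs : Multiset Char)).card := by
  have := congrArg Multiset.card (removeLoop_multiset vs temp)
  simpa using this

-- isSame is exactly multiset equality
theorem isSameA_iff (il cl : List Char) :
    isSameA il cl = true ↔ (il : Multiset Char) = (cl : Multiset Char) := by
  unfold isSameA
  by_cases hset : PySem.Set.equal (PySem.Set.ofList il) (PySem.Set.ofList cl) = true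
  · rw [if_neg (by simp [hset])]
    have hmem : ∀ x : Char, x ∈ il ↔ x ∈ cl := by
      intro x
      have := (PySem.Set.equal_iff _ _).mp hset x
      simpa [PySem.Set.mem_ofList] using this
    rw [List.all_eq_true]
    constructor
    · intro hall
      refine Multiset.ext.mpr (fun a => ?_)
      rw [Multiset.coe_count, Multiset.coe_count]
      by_cases ha : a ∈ il
      · have := hall a ((PySem.Set.mem_ofList il a).mpr ha)
        have hc : PySem.List.count il a = PySem.List.count cl a := by simpa using this
        simpa [PySem.List.count_eq] using hc
      · have hacl : a ∉ cl := fun hx => ha ((hmem a).mpr hx)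
        rw [List.count_eq_zero.mpr ha, List.count_eq_zero.mpr hacl]
    · intro h s _
      have hperm : il.Perm cl := Multiset.coe_eq_coe.mp h
      simp [PySem.List.count_eq, hperm.count_eq]
  · rw [if_pos (by simp [hset])]
    constructor
    · intro h; exact absurd h (by simp)
    · intro h
      exfalso
      apply hset
      have hperm : il.Perm cl := Multiset.coe_eq_coe.mp h
      rw [PySem.Set.equal_iff]
      intro x; simp [PySem.Set.mem_ofList, hperm.mem_iff]

-- two small multiset facts used by the merge lemma
theorem cons_sub_of_not_mem {x : Char} {s t : Multiset Char} (h : x ∉ t) :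
    (x ::ₘ s) - t = x ::ₘ (s - t) := by
  ext a
  simp only [Multiset.count_sub, Multiset.count_cons]
  by_cases hax : a = x
  · subst hax
    rw [Multiset.count_eq_zero.mpr h]; omega
  · simp [hax]

theorem sub_cons_of_not_mem {x : Char} {s t : Multiset Char} (h : x ∉ t) :
    t - (x ::ₘ s) = t - s := by
  ext a
  simp only [Multiset.count_sub, Multiset.count_cons]
  by_cases hax : a = x
  · subst hax
    rw [Multiset.count_eq_zero.mpr h]; omega
  · simp [hax]

theorem mergeGo_spec : ∀ (a b : List Char) (pa pb : Int),
    a.Pairwise (· ≤ ·) → b.Pairwise (· ≤ ·) →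
    mergeGo a b pa pb =
      (pa + (((a : Multiset Char) - (b : Multiset Char)).card : Int),
       pb + (((b : Multiset Char) - (a : Multiset Char)).card : Int)) := by
  intro a b pa pb ha hb
  induction a, b, pa, pb using mergeGo.induct with
  | case1 b pa pb => simp [mergeGo]
  | case2 x a pa pb => simp [mergeGo]
  | case3 a y b pa pb ih =>
    rw [mergeGo, if_pos rfl, ih (List.Pairwise.of_cons ha) (List.Pairwise.of_cons hb)]
    have h1 : ((y :: a : List Char) : Multiset Char) = y ::ₘ (a : Multiset Char) := rfl
    have h2 : ((y :: b : List Char) : Multiset Char) = y ::ₘ (b : Multiset Char) := rfl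
    rw [h1, h2, Multiset.sub_cons, Multiset.sub_cons, Multiset.erase_cons_head,
      Multiset.erase_cons_head]
  | case4 x a y b pa pb hne hlt ih =>
    rw [mergeGo]
    rw [if_neg hne, if_pos hlt]
    rw [ih (List.Pairwise.of_cons ha) hb]
    have hx : x ∉ ((y :: b : List Char) : Multiset Char) := by
      simp only [Multiset.mem_coe, List.mem_cons]
      rintro (rfl | hxb)
      · exact hne rfl
      · have := (List.pairwise_cons.mp hb).1 x hxb
        exact absurd hlt (not_lt.mpr this)
    have h1 : ((x :: a : List Char) : Multiset Char) = x ::ₘ (a : Multiset Char) := rfl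
    rw [h1, cons_sub_of_not_mem hx, sub_cons_of_not_mem hx, Multiset.card_cons]
    simp only [Prod.mk.injEq]
    refine ⟨?_, trivial⟩
    push_cast; ring
  | case5 x a y b pa pb hne hnlt ih =>
    rw [mergeGo]
    rw [if_neg hne, if_neg hnlt]
    rw [ih ha (List.Pairwise.of_cons hb)]
    have hylt : y < x := lt_of_le_of_ne (not_lt.mp hnlt) (fun h => hne h.symm)
    have hy : y ∉ ((x :: a : List Char) : Multiset Char) := by
      simp only [Multiset.mem_coe, List.mem_cons]
      rintro (rfl | hya)
      · exact hne rfl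
      · have := (List.pairwise_cons.mp ha).1 y hya
        exact absurd hylt (not_lt.mpr this)
    have h2 : ((y :: b : List Char) : Multiset Char) = y ::ₘ (b : Multiset Char) := rfl
    rw [h2, cons_sub_of_not_mem hy, sub_cons_of_not_mem hy, Multiset.card_cons]
    simp only [Prod.mk.injEq]
    refine ⟨trivial, ?_⟩
    push_cast; ring

theorem main_eq (initial candidate : String) :
    isSimmilar initial candidate = isSimmilar_alt initial candidate := by
  have hpa := PySem.List.sorted_perm initial.toList (fun x => x) false
  have hpb := PySem.List.sorted_perm candidate.toList (fun x => x) false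
  have hsa : ((PySem.List.sorted initial.toList (fun x => x) false : List Char) : Multiset Char)
      = (initial.toList : Multiset Char) := Multiset.coe_eq_coe.mpr hpa
  have hsb : ((PySem.List.sorted candidate.toList (fun x => x) false : List Char) : Multiset Char)
      = (candidate.toList : Multiset Char) := Multiset.coe_eq_coe.mpr hpb
  set I : Multiset Char := (initial.toList : Multiset Char) with hI
  set C : Multiset Char := (candidate.toList : Multiset Char) with hC
  have hmerge : mergeGo (PySem.List.sorted initial.toList (fun x => x) false)
      (PySem.List.sorted candidate.toList (fun x => x) false) 0 0
      = (((I - C).card : Int), ((C - I).card : Int)) := by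
    rw [mergeGo_spec _ _ _ _ (PySem.List.sorted_pairwise initial.toList (fun x => x))
      (PySem.List.sorted_pairwise candidate.toList (fun x => x)), hsa, hsb]
    simp
  have hcardI : I.card = initial.toList.length := by rw [hI]; simp
  have hcardC : C.card = candidate.toList.length := by rw [hC]; simp
  simp only [isSimmilar, isSimmilar_alt, hmerge, PySem.Str.len_eq, removeLoop_length, ← hI, ← hC]
  by_cases hlen : (initial.toList.length : Int) = (candidate.toList.length : Int)
  · rw [if_pos hlen, if_pos hlen]
    by_cases hsame : isSameA initial.toList candidate.toList = true
    · rw [if_pos hsame]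
      have : I = C := (isSameA_iff _ _).mp hsame
      rw [if_pos]; rw [this]; simp
    · rw [if_neg hsame]
      have hne : I ≠ C := fun h => hsame ((isSameA_iff _ _).mpr h)
      have hcne : (C - I).card ≠ 0 := by
        intro h0
        have : C - I = 0 := Multiset.card_eq_zero.mp h0
        have hle : C ≤ I := tsub_eq_zero_iff_le.mp this
        have : C = I := Multiset.eq_of_le_of_card_le hle (by omega)
        exact hne this.symm
      by_cases h1 : (C - I).card = 1
      · rw [if_pos h1, if_pos (by exact_mod_cast Nat.le_of_eq h1)]
      · rw [if_neg h1, if_neg (by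
          intro hle
          have : (C - I).card ≤ 1 := by exact_mod_cast hle
          omega)]
  · rw [if_neg hlen, if_neg hlen]
    by_cases hlen2 : (initial.toList.length : Int) = (candidate.toList.length : Int) + 1
    · rw [if_pos hlen2, if_pos hlen2]
      by_cases h1 : (I - C).card = 1
      · rw [if_pos h1, if_pos (by exact_mod_cast h1)]
      · rw [if_neg h1, if_neg (by intro h; exact h1 (by exact_mod_cast h))]
    · rw [if_neg hlen2, if_neg hlen2]
      by_cases hlen3 : (initial.toList.length : Int) + 1 = (candidate.toList.length : Int)
      · rw [if_pos hlen3, if_pos hlen3]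
        by_cases h1 : (C - I).card = 1
        · rw [if_pos h1, if_pos (by exact_mod_cast h1)]
        · rw [if_neg h1, if_neg (by intro h; exact h1 (by exact_mod_cast h))]
      · rw [if_neg hlen3, if_neg hlen3]

-- ===== VERDICT (by name: the statement is the Claim_ definition above) =====
theorem isSimmilar_spec : Claim_equal_isSimmilar := by
  intro initial candidate _
  unfold Spec_isSimmilar
  exact main_eq initial candidate
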